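-- pv_equiv track=rewrite | github.com/fathurwithyou/silberschatz | src/processor/operators/update_operator.py | _parse_assignment_string
-- ===== SOURCE A (Python) =====
-- from typing import Dict, Any
--
-- def _parse_assignment_string(assignment_str: str) -> Dict[str, str]:
--     assignments = {}
--
--     parts = []
--     cur = []
--     in_quote = False
--     q = None
--
--     for c in assignment_str:
--         if c in ('"', "'") and not in_quote:
--             in_quote = True
--             q = c
--             cur.append(c)
--         elif c == q and in_quote:
--             in_quote = False
--             q = None
--             cur.append(c)
--         elif c == ',' and not in_quote:
--             parts.append(''.join(cur).strip())
--             cur = []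
--         else:
--             cur.append(c)
--
--     if cur:
--         parts.append(''.join(cur).strip())
--
--     for p in parts:
--         if '=' in p:
--             col, val = p.split('=', 1)
--             assignments[col.strip()] = val.strip()
--
--     return assignments
-- ===== SOURCE B (Python) =====
-- def _parse_assignment_string(assignment_str: str) -> dict:
--     # single-pass state machine: no intermediate parts list, no second split pass
--     assignments = {}
--     key = []
--     val = []
--     seen_eq = False
--     in_quote = False
--     q = None
--     for c in assignment_str:
--         if c in ('"', "'") and not in_quote:
--             in_quote = True
--             q = c
--             (val if seen_eq else key).append(c)
--         elif c == q and in_quote: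
--             in_quote = False
--             q = None
--             (val if seen_eq else key).append(c)
--         elif c == ',' and not in_quote:
--             if seen_eq:
--                 assignments[''.join(key).strip()] = ''.join(val).strip()
--             key = []
--             val = []
--             seen_eq = False
--         elif c == '=' and not seen_eq:
--             seen_eq = True
--         else:
--             (val if seen_eq else key).append(c)
--     if seen_eq:
--         assignments[''.join(key).strip()] = ''.join(val).strip()
--     return assignments
-- ===== Notes on version B (the rewrite author's own statement) =====
-- stated objective: alternative
-- what changed: Replaced A's two-phase design (quote-aware comma split into a parts list, then a second pass splitting each part on '=') with a single-pass state machine that keeps key/value buffers and a seen-'=' flag and writes completed assignments directly into the result dict.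
import Mathlib
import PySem

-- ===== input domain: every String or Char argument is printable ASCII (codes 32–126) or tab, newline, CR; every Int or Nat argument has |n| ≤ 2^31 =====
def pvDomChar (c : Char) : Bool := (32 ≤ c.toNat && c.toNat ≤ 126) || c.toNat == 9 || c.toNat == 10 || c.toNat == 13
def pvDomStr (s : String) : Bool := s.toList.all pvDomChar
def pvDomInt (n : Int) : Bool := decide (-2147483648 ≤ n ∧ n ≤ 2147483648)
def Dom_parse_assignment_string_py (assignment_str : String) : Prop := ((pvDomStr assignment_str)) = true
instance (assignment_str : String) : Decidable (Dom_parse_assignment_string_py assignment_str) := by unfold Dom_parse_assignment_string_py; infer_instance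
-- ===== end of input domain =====

-- B replaces A's two passes (quote-aware comma split into parts, then split each part on '=')
-- by a single-pass state machine writing finished assignments directly into the dict; return values proved equal.

-- ===== PORT A =====
-- loop state: (parts, cur, in_quote, q)
def pvStepA (st : List (List Char) × List Char × Bool × Option Char) (c : Char) :
    List (List Char) × List Char × Bool × Option Char :=
  if (c = '"' ∨ c = '\'') ∧ st.2.2.1 = false then
    (st.1, st.2.1 ++ [c], true, some c)
  else if some c = st.2.2.2 ∧ st.2.2.1 = true then
    (st.1, st.2.1 ++ [c], false, none)
  else if c = ',' ∧ st.2.2.1 = false then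
    (st.1 ++ [PySem.Chars.strip st.2.1], [], st.2.2.1, st.2.2.2)
  else
    (st.1, st.2.1 ++ [c], st.2.2.1, st.2.2.2)

-- second loop body; p.split('=', 1) (with '=' ∈ p) is ported by hand, exactly:
-- the text before the first '=' and the text after it
def pvAssignA (d : PySem.Dict String String) (p : List Char) : PySem.Dict String String :=
  if '=' ∈ p then
    PySem.Dict.insert d (String.ofList (PySem.Chars.strip (p.takeWhile (fun c => c ≠ '='))))
      (String.ofList (PySem.Chars.strip ((p.dropWhile (fun c => c ≠ '=')).drop 1)))
  else d

def parse_assignment_string_py (assignment_str : String) : List (String × String) :=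
  let st := assignment_str.toList.foldl pvStepA ([], [], false, none)
  let parts := if st.2.1 ≠ [] then st.1 ++ [PySem.Chars.strip st.2.1] else st.1
  (parts.foldl pvAssignA PySem.Dict.empty).items

-- ===== PORT B =====
-- single-pass machine state
structure PvSt where
  d : PySem.Dict String String
  key : List Char
  val : List Char
  seenEq : Bool
  inq : Bool
  q : Option Char

def pvStepB (st : PvSt) (c : Char) : PvSt :=
  if (c = '"' ∨ c = '\'') ∧ st.inq = false then
    if st.seenEq then { st with val := st.val ++ [c], inq := true, q := some c }
    else { st with key := st.key ++ [c], inq := true, q := some c }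
  else if some c = st.q ∧ st.inq = true then
    if st.seenEq then { st with val := st.val ++ [c], inq := false, q := none }
    else { st with key := st.key ++ [c], inq := false, q := none }
  else if c = ',' ∧ st.inq = false then
    { d := if st.seenEq then
             PySem.Dict.insert st.d (String.ofList (PySem.Chars.strip st.key))
               (String.ofList (PySem.Chars.strip st.val))
           else st.d,
      key := [], val := [], seenEq := false, inq := st.inq, q := st.q }
  else if c = '=' ∧ st.seenEq = false then { st with seenEq := true }
  else
    if st.seenEq then { st with val := st.val ++ [c] } else { st with key := st.key ++ [c] }

def pvFlushB (st : PvSt) : PySem.Dict String String :=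
  if st.seenEq then
    PySem.Dict.insert st.d (String.ofList (PySem.Chars.strip st.key))
      (String.ofList (PySem.Chars.strip st.val))
  else st.d

def parse_assignment_string_py_alt (assignment_str : String) : List (String × String) :=
  (pvFlushB (assignment_str.toList.foldl pvStepB ⟨PySem.Dict.empty, [], [], false, false, none⟩)).items

-- ===== PRECONDITION & SPEC =====
def Spec_parse_assignment_string_py (assignment_str : String) (out : List (String × String)) : Prop := out = parse_assignment_string_py_alt assignment_str
instance (assignment_str : String) (out : List (String × String)) : Decidable (Spec_parse_assignment_string_py assignment_str out) := by unfold Spec_parse_assignment_string_py; infer_instance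

-- ===== CLAIM (what is proved, stated in full; the proofs are below) =====
def Claim_equal_parse_assignment_string_py : Prop := ∀ (assignment_str : String), Dom_parse_assignment_string_py assignment_str → Spec_parse_assignment_string_py assignment_str (parse_assignment_string_py assignment_str)

-- ===== LEMMAS AND PROOFS =====

-- abbreviations used only by the proofs
def pvFinA (st : List (List Char) × List Char × Bool × Option Char)
    (d : PySem.Dict String String) : PySem.Dict String String :=
  (if st.2.1 ≠ [] then st.1 ++ [PySem.Chars.strip st.2.1] else st.1).foldl pvAssignA d

-- the link between A's current segment and B's buffers
def pvLink (cur key val : List Char) (seenEq : Bool) : Prop :=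
  (seenEq = true → cur = key ++ '=' :: val ∧ '=' ∉ key) ∧
  (seenEq = false → cur = key ∧ '=' ∉ key ∧ val = [])

theorem pv_dropWhile_idem (p : Char → Bool) (l : List Char) :
    List.dropWhile p (List.dropWhile p l) = List.dropWhile p l := by
  induction l with
  | nil => simp
  | cons x xs ih => by_cases h : p x <;> simp [h, ih]

theorem pv_head_dropWhile (p : Char → Bool) (l : List Char) (a : Char) (t : List Char)
    (h : List.dropWhile p l = a :: t) : p a = false := by
  induction l with
  | nil => simp at h
  | cons x xs ih =>
    rw [List.dropWhile_cons] at h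
    by_cases hx : p x
    · exact ih (by simpa [hx] using h)
    · rw [if_neg (by simpa using hx)] at h
      injection h with h1 _
      subst h1; simpa using hx

theorem pv_lstrip_idem (l : List Char) :
    PySem.Chars.lstrip (PySem.Chars.lstrip l) = PySem.Chars.lstrip l := by
  simp [PySem.Chars.lstrip, pv_dropWhile_idem]

theorem pv_rstrip_idem (l : List Char) :
    PySem.Chars.rstrip (PySem.Chars.rstrip l) = PySem.Chars.rstrip l := by
  simp [PySem.Chars.rstrip, pv_dropWhile_idem]

theorem pv_rstrip_sublist (l : List Char) : (PySem.Chars.rstrip l).Sublist l := by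
  have h := (List.dropWhile_sublist (l := l.reverse) PySem.Chars.isspace).reverse
  simpa [PySem.Chars.rstrip] using h

theorem pv_rstrip_cons_of_not (a : Char) (t : List Char) (h : PySem.Chars.isspace a = false) :
    PySem.Chars.rstrip (a :: t) = a :: PySem.Chars.rstrip t := by
  unfold PySem.Chars.rstrip
  rw [List.reverse_cons, List.dropWhile_append]
  by_cases he : (List.dropWhile PySem.Chars.isspace t.reverse).isEmpty
  · rw [List.isEmpty_iff] at he
    simp [he, h]
  · simp [he]

theorem pv_rstrip_append (w m : List Char) (a : Char) (ha : a ∈ m)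
    (hna : PySem.Chars.isspace a = false) :
    PySem.Chars.rstrip (w ++ m) = w ++ PySem.Chars.rstrip m := by
  unfold PySem.Chars.rstrip
  rw [List.reverse_append, List.dropWhile_append]
  have hne : ¬ (List.dropWhile PySem.Chars.isspace m.reverse).isEmpty := by
    rw [List.isEmpty_iff, List.dropWhile_eq_nil_iff]
    intro hall
    have := hall a (by simpa using ha)
    simp [hna] at this
  simp [hne]

theorem pv_lstrip_rstrip_comm (l : List Char) :
    PySem.Chars.lstrip (PySem.Chars.rstrip l) = PySem.Chars.rstrip (PySem.Chars.lstrip l) := by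
  cases h : List.dropWhile PySem.Chars.isspace l with
  | nil =>
    have hall : ∀ x ∈ l, PySem.Chars.isspace x = true := List.dropWhile_eq_nil_iff.1 h
    have h1 : PySem.Chars.lstrip (PySem.Chars.rstrip l) = [] := by
      rw [PySem.Chars.lstrip, List.dropWhile_eq_nil_iff]
      exact fun x hx => hall x ((pv_rstrip_sublist l).mem hx)
    rw [h1]
    show ([] : List Char) = PySem.Chars.rstrip (PySem.Chars.lstrip l)
    rw [PySem.Chars.lstrip, h]
    rfl
  | cons a t =>
    have ha : PySem.Chars.isspace a = false := pv_head_dropWhile _ _ _ _ h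
    have hw : List.takeWhile PySem.Chars.isspace l ++ a :: t = l := by
      rw [← h]; exact List.takeWhile_append_dropWhile
    have hws : ∀ x ∈ List.takeWhile PySem.Chars.isspace l, PySem.Chars.isspace x = true :=
      fun x hx => List.mem_takeWhile_imp hx
    conv_lhs => rw [← hw]
    rw [pv_rstrip_append _ _ a (by simp) ha, pv_rstrip_cons_of_not a t ha]
    rw [PySem.Chars.lstrip, List.dropWhile_append]
    have he : (List.dropWhile PySem.Chars.isspace (List.takeWhile PySem.Chars.isspace l)).isEmpty := by
      rw [List.isEmpty_iff, List.dropWhile_eq_nil_iff]; exact hws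
    rw [if_pos he, List.dropWhile_cons, if_neg (by simp [ha])]
    rw [PySem.Chars.lstrip, h, pv_rstrip_cons_of_not a t ha]

theorem pv_strip_lstrip (l : List Char) :
    PySem.Chars.strip (PySem.Chars.lstrip l) = PySem.Chars.strip l := by
  simp [PySem.Chars.strip, pv_lstrip_idem]

theorem pv_strip_rstrip (l : List Char) :
    PySem.Chars.strip (PySem.Chars.rstrip l) = PySem.Chars.strip l := by
  rw [PySem.Chars.strip, pv_lstrip_rstrip_comm, PySem.Chars.strip]
  exact pv_rstrip_idem _

theorem pv_strip_mid (key val : List Char) :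
    PySem.Chars.strip (key ++ '=' :: val)
      = PySem.Chars.lstrip key ++ '=' :: PySem.Chars.rstrip val := by
  have heq : PySem.Chars.isspace '=' = false := by decide
  have h1 : PySem.Chars.lstrip (key ++ '=' :: val) = PySem.Chars.lstrip key ++ '=' :: val := by
    rw [PySem.Chars.lstrip, List.dropWhile_append]
    by_cases he : (List.dropWhile PySem.Chars.isspace key).isEmpty
    · rw [List.isEmpty_iff] at he
      simp [PySem.Chars.lstrip, he, heq]
    · rw [if_neg he]; rfl
  rw [PySem.Chars.strip, h1, pv_rstrip_append _ _ '=' (by simp) heq,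
    pv_rstrip_cons_of_not _ _ heq]

theorem pv_not_mem_lstrip {l : List Char} (h : '=' ∉ l) : '=' ∉ PySem.Chars.lstrip l :=
  fun hx => h ((List.dropWhile_sublist _).mem hx)

theorem pv_not_mem_strip {l : List Char} (h : '=' ∉ l) : '=' ∉ PySem.Chars.strip l :=
  fun hx => h ((List.dropWhile_sublist _).mem ((pv_rstrip_sublist _).mem hx))

theorem pv_takeWhile_mid (a b : List Char) (h : '=' ∉ a) :
    (a ++ '=' :: b).takeWhile (fun c => c ≠ '=') = a := by
  induction a with
  | nil => simp
  | cons x xs ih =>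
    have hx : x ≠ '=' := by intro hc; exact h (by simp [hc])
    rw [List.cons_append, List.takeWhile_cons, if_pos (by simp [hx]),
      ih (fun hm => h (by simp [hm]))]

theorem pv_dropWhile_mid (a b : List Char) (h : '=' ∉ a) :
    (a ++ '=' :: b).dropWhile (fun c => c ≠ '=') = '=' :: b := by
  induction a with
  | nil => simp
  | cons x xs ih =>
    have hx : x ≠ '=' := by intro hc; exact h (by simp [hc])
    rw [List.cons_append, List.dropWhile_cons, if_pos (by simp [hx]),
      ih (fun hm => h (by simp [hm]))]

-- the central segment lemma: A's strip-then-split-then-strip of a completed segment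
-- equals B's strip of the two buffers
theorem pv_assign_seg (d : PySem.Dict String String) (key val : List Char) (h : '=' ∉ key) :
    pvAssignA d (PySem.Chars.strip (key ++ '=' :: val))
      = PySem.Dict.insert d (String.ofList (PySem.Chars.strip key))
          (String.ofList (PySem.Chars.strip val)) := by
  rw [pv_strip_mid]
  unfold pvAssignA
  rw [if_pos (by simp)]
  rw [pv_takeWhile_mid _ _ (pv_not_mem_lstrip h), pv_dropWhile_mid _ _ (pv_not_mem_lstrip h)]
  simp [pv_strip_lstrip, pv_strip_rstrip]

theorem pv_assign_noeq (d : PySem.Dict String String) (key : List Char) (h : '=' ∉ key) :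
    pvAssignA d (PySem.Chars.strip key) = d := by
  unfold pvAssignA
  rw [if_neg (pv_not_mem_strip h)]

-- the main simulation invariant
theorem pv_main (cs : List Char) :
    ∀ (P : List (List Char)) (cur : List Char) (inq : Bool) (q : Option Char)
      (key val : List Char) (seenEq : Bool) (d : PySem.Dict String String),
      q ≠ some '=' →
      pvLink cur key val seenEq →
      pvFinA (cs.foldl pvStepA (P, cur, inq, q)) d
        = pvFlushB (cs.foldl pvStepB ⟨P.foldl pvAssignA d, key, val, seenEq, inq, q⟩) := by
  induction cs with
  | nil =>
    intro P cur inq q key val seenEq d hq hL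
    obtain ⟨hT, hF⟩ := hL
    cases seenEq with
    | true =>
      obtain ⟨hcur, hk⟩ := hT rfl
      rw [hcur]
      simp only [List.foldl_nil, pvFinA, pvFlushB]
      rw [if_pos (by simp), List.foldl_append]
      simp [pv_assign_seg _ _ _ hk]
    | false =>
      obtain ⟨hcur, hk, hv⟩ := hF rfl
      rw [hcur]
      simp only [List.foldl_nil, pvFinA, pvFlushB]
      by_cases hke : key = []
      · simp [hke]
      · rw [if_pos (by simpa using hke), List.foldl_append]
        simp [pv_assign_noeq _ _ hk]
  | cons c cs ih =>
    intro P cur inq q key val seenEq d hq hL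
    obtain ⟨hT, hF⟩ := hL
    simp only [List.foldl_cons]
    by_cases h1 : (c = '"' ∨ c = '\'') ∧ inq = false
    · have hc : c ≠ '=' := by rcases h1.1 with h | h <;> subst h <;> decide
      cases seenEq with
      | true =>
        obtain ⟨hcur, hk⟩ := hT rfl
        simp [pvStepA, pvStepB, h1]
        exact ih P _ _ _ key (val ++ [c]) true d (by simp [hc])
          ⟨fun _ => ⟨by simp [hcur], hk⟩, by simp⟩
      | false =>
        obtain ⟨hcur, hk, hv⟩ := hF rfl
        simp [pvStepA, pvStepB, h1]
        exact ih P _ _ _ (key ++ [c]) val false d (by simp [hc])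
          ⟨by simp, fun _ => ⟨by simp [hcur], by simp [hk, Ne.symm hc], hv⟩⟩
    · by_cases h2 : some c = q ∧ inq = true
      · cases seenEq with
        | true =>
          obtain ⟨hcur, hk⟩ := hT rfl
          simp [pvStepA, pvStepB, h1, h2]
          exact ih P _ _ _ key (val ++ [c]) true d (by simp)
            ⟨fun _ => ⟨by simp [hcur], hk⟩, by simp⟩
        | false =>
          obtain ⟨hcur, hk, hv⟩ := hF rfl
          have hc : c ≠ '=' := by
            intro hcc
            exact hq (by rw [← h2.1, hcc])
          simp [pvStepA, pvStepB, h1, h2]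
          exact ih P _ _ _ (key ++ [c]) val false d (by simp)
            ⟨by simp, fun _ => ⟨by simp [hcur], by simp [hk, Ne.symm hc], hv⟩⟩
      · by_cases h3 : c = ',' ∧ inq = false
        · cases seenEq with
          | true =>
            obtain ⟨hcur, hk⟩ := hT rfl
            rw [hcur]
            simp [pvStepA, pvStepB, h1, h2, h3]
            have := ih (P ++ [PySem.Chars.strip (key ++ '=' :: val)]) [] false q [] [] false
              d hq ⟨by simp, fun _ => ⟨rfl, by simp, rfl⟩⟩
            rw [List.foldl_append] at this
            simpa [pv_assign_seg _ _ _ hk] using this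
          | false =>
            obtain ⟨hcur, hk, hv⟩ := hF rfl
            rw [hcur]
            simp [pvStepA, pvStepB, h1, h2, h3]
            have := ih (P ++ [PySem.Chars.strip key]) [] false q [] [] false
              d hq ⟨by simp, fun _ => ⟨rfl, by simp, rfl⟩⟩
            rw [List.foldl_append] at this
            simpa [pv_assign_noeq _ _ hk] using this
        · by_cases h4 : c = '=' ∧ seenEq = false
          · obtain ⟨hcur, hk, hv⟩ := hF h4.2
            obtain ⟨hc, hsq⟩ := h4
            subst hc; subst hsq
            simp [pvStepA, pvStepB, h1, h2, h3, hv]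
            exact ih P _ _ _ key [] true d hq
              ⟨fun _ => ⟨by simp [hcur], hk⟩, by simp⟩
          · cases seenEq with
            | true =>
              obtain ⟨hcur, hk⟩ := hT rfl
              simp [pvStepA, pvStepB, h1, h2, h3]
              exact ih P _ _ _ key (val ++ [c]) true d hq
                ⟨fun _ => ⟨by simp [hcur], hk⟩, by simp⟩
            | false =>
              obtain ⟨hcur, hk, hv⟩ := hF rfl
              have hc : c ≠ '=' := fun hcc => h4 ⟨hcc, rfl⟩
              simp [pvStepA, pvStepB, h1, h2, h3, hc]
              exact ih P _ _ _ (key ++ [c]) val false d hq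
                ⟨by simp, fun _ => ⟨by simp [hcur], by simp [hk, Ne.symm hc], hv⟩⟩

-- ===== VERDICT (by name: the statement is the Claim_ definition above) =====
theorem parse_assignment_string_py_spec : Claim_equal_parse_assignment_string_py := by
  intro s _
  unfold Spec_parse_assignment_string_py parse_assignment_string_py parse_assignment_string_py_alt
  have h := pv_main s.toList [] [] false none [] [] false PySem.Dict.empty
    (by simp) (by constructor <;> simp)
  simpa [pvFinA, List.foldl] using congrArg PySem.Dict.items h
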